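-- pv_equiv track=rewrite | github.com/daniel4828/AnkiAdvanced | yaml_fixer.py | _is_problematic
-- ===== SOURCE A (Python) =====
-- def _is_problematic(value: str) -> bool:
--     """Return True if *value* would cause a YAML parse error in a block mapping."""
--     # Already single-quoted — YAML single-quote syntax is robust, leave it alone.
--     if value.startswith("'"):
--         return False
--
--     # Double-quoted: problematic if it contains an unescaped inner " character.
--     if value.startswith('"') and value.endswith('"') and len(value) >= 2:
--         inner = value[1:-1]
--         i = 0
--         while i < len(inner):
--             if inner[i] == '\\':
--                 i += 2  # skip \X escape sequence
--                 continue
--             if inner[i] == '"':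
--                 return True
--             i += 1
--         return False
--
--     # Unquoted: problematic if it contains ": " (colon-space), which YAML
--     # interprets as the start of a new mapping value in block context.
--     if ': ' in value or value.endswith(':'):
--         return True
--
--     return False
-- ===== SOURCE B (Python) =====
-- def _trailing_backslash_parity_even(part):
--     """True iff *part* ends in an even number (possibly zero) of backslashes."""
--     n = 0
--     for ch in reversed(part):
--         if ch != '\\':
--             break
--         n += 1
--     return n % 2 == 0
--
--
-- def _is_problematic(value: str) -> bool:
--     """Return True if *value* would cause a YAML parse error in a block mapping."""
--     if value.startswith("'"):
--         return False
--     if value.startswith('"') and value.endswith('"') and len(value) >= 2: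
--         inner = value[1:-1]
--         # An inner quote is unescaped iff it is preceded by an even run of
--         # backslashes: split on '"' and test the run parity of each piece.
--         parts = inner.split('"')
--         return any(_trailing_backslash_parity_even(p) for p in parts[:-1])
--     return ': ' in value or value.endswith(':')
-- ===== Notes on version B (the rewrite author's own statement) =====
-- stated objective: alternative
-- what changed: The double-quoted branch's stateful while-loop that jumps i+=2 over backslash escapes is replaced by splitting the inner string at the quote character and reporting a problem iff some quote boundary is preceded by an even run of trailing backslashes (run-parity instead of skip-state).
import Mathlib
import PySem

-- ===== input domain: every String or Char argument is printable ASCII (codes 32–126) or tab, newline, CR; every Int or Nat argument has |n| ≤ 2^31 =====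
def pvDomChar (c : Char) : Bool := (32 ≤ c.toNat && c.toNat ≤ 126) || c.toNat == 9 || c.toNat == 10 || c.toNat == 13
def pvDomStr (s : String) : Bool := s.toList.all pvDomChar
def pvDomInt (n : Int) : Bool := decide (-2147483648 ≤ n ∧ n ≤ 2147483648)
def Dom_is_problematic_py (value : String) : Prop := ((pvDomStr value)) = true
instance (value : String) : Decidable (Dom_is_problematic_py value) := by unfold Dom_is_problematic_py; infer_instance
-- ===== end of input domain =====

-- B replaces A's index-jumping escape scan of the double-quoted body by
-- split-on-quote + backslash-run-parity; same value everywhere (alternative, not faster).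

-- ===== PORT A =====
-- A's while-loop over inner: i += 2 on a backslash (skip the escaped char), True on '"'.
def aScan : List Char → Bool
  | [] => false
  | c :: rest =>
    if c = '\\' then aScan rest.tail
    else if c = '"' then true
    else aScan rest
termination_by cs => cs.length
decreasing_by all_goals (simp [List.length_tail]; try omega)

def is_problematic_py (value : String) : Bool :=
  if PySem.Str.startswith value "'" then false
  else if PySem.Str.startswith value "\"" && PySem.Str.endswith value "\"" &&
          decide ((2 : Int) ≤ PySem.Str.len value) then
    aScan (PySem.List.slice value.toList (some 1) (some (-1)))
  else if PySem.Str.isIn ": " value || PySem.Str.endswith value ":" then true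
  else false

-- ===== PORT B =====
-- port of _trailing_backslash_parity_even's counting loop over reversed(part)
def bTrailCount : List Char → Nat
  | [] => 0
  | c :: r => if c ≠ '\\' then 0 else bTrailCount r + 1

def bEvenTrail (part : List Char) : Bool := bTrailCount part.reverse % 2 == 0

def is_problematic_py_alt (value : String) : Bool :=
  if PySem.Str.startswith value "'" then false
  else if PySem.Str.startswith value "\"" && PySem.Str.endswith value "\"" &&
          decide ((2 : Int) ≤ PySem.Str.len value) then
    -- inner.split('"') ported as Mathlib's List.splitOn; parts[:-1] as a slice
    (PySem.List.slice ((PySem.List.slice value.toList (some 1) (some (-1))).splitOn '"')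
        none (some (-1))).any bEvenTrail
  else PySem.Str.isIn ": " value || PySem.Str.endswith value ":"

-- ===== PRECONDITION & SPEC =====
def Spec_is_problematic_py (value : String) (out : Bool) : Prop := out = is_problematic_py_alt value
instance (value : String) (out : Bool) : Decidable (Spec_is_problematic_py value out) := by unfold Spec_is_problematic_py; infer_instance

-- ===== CLAIM (what is proved, stated in full; the proofs are below) =====
def Claim_equal_is_problematic_py : Prop := ∀ (value : String), Dom_is_problematic_py value → Spec_is_problematic_py value (is_problematic_py value)

-- ===== LEMMAS AND PROOFS =====

-- appending a non-backslash does not change the leading-backslash count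
theorem bTrailCount_append_ne (l : List Char) (c : Char) (hc : c ≠ '\\') :
    bTrailCount (l ++ [c]) = bTrailCount l := by
  induction l with
  | nil => simp [bTrailCount, hc]
  | cons d r ih => by_cases hd : d = '\\' <;> simp [bTrailCount, hd, ih]

-- appending any char followed by a backslash preserves the parity of the count
theorem bTrailCount_append_pair (l : List Char) (e : Char) :
    bTrailCount (l ++ [e, '\\']) % 2 = bTrailCount l % 2 := by
  induction l with
  | nil =>
    by_cases he : e = '\\' <;> simp [bTrailCount, he]
  | cons d r ih =>
    by_cases hd : d = '\\' <;> simp [bTrailCount, hd]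
    omega

theorem bEvenTrail_cons_ne (c : Char) (h : List Char) (hc : c ≠ '\\') :
    bEvenTrail (c :: h) = bEvenTrail h := by
  simp [bEvenTrail, bTrailCount_append_ne _ _ hc]

theorem bEvenTrail_bs_pair (e : Char) (h : List Char) :
    bEvenTrail ('\\' :: e :: h) = bEvenTrail h := by
  simp only [bEvenTrail, List.reverse_cons, List.append_assoc, List.singleton_append]
  rw [bTrailCount_append_pair]

-- B's check on the inner string, with parts[:-1] rewritten to dropLast
def bCheck (cs : List Char) : Bool := ((cs.splitOn '"').dropLast).any bEvenTrail

theorem bCheck_quote (cs : List Char) : bCheck ('"' :: cs) = true := by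
  have hne := List.splitOnP_ne_nil (fun x => x == '"') cs
  simp only [bCheck, List.splitOn, List.splitOnP_cons, beq_self_eq_true, if_pos]
  rw [List.dropLast_cons_of_ne_nil hne]
  simp [bEvenTrail, bTrailCount]

theorem bCheck_cons_ne (c : Char) (cs : List Char) (hc : c ≠ '"') (hb : c ≠ '\\') :
    bCheck (c :: cs) = bCheck cs := by
  simp only [bCheck, List.splitOn, List.splitOnP_cons, beq_iff_eq, if_neg hc]
  rcases hh : List.splitOnP (fun x => x == '"') cs with _ | ⟨h, t⟩
  · exact absurd hh (List.splitOnP_ne_nil _ _)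
  · rcases t with _ | ⟨u, t'⟩
    · simp
    · rw [List.modifyHead_cons]
      simp [List.dropLast_cons₂, bEvenTrail_cons_ne c h hb]

-- main bridge: A's escape scan equals B's split-and-parity check
theorem aScan_eq_bCheck (cs : List Char) : aScan cs = bCheck cs := by
  induction cs using aScan.induct with
  | case1 => simp [aScan, bCheck, List.splitOn]
  | case2 rest ih =>
    rw [aScan]
    simp only [if_true]
    rcases rest with _ | ⟨d, cs'⟩
    · simp [aScan, bCheck, List.splitOn]
    · -- '\' followed by d: the pair never fires; B agrees through run parity
      simp only [List.tail_cons] at ih ⊢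
      by_cases hd : d = '"'
      · subst hd
        rw [ih]
        have hne := List.splitOnP_ne_nil (fun x => x == '"') cs'
        simp only [bCheck, List.splitOn, List.splitOnP_cons, beq_self_eq_true, if_pos,
          beq_iff_eq]
        rw [if_neg (show ¬('\\' : Char) = '"' by decide), List.modifyHead_cons,
          List.dropLast_cons_of_ne_nil hne]
        simp [bEvenTrail, bTrailCount]
      · rw [ih]
        simp only [bCheck, List.splitOn, List.splitOnP_cons, beq_iff_eq, if_neg hd,
          if_neg (show ('\\' : Char) ≠ '"' by decide)]
        rcases hh : List.splitOnP (fun x => x == '"') cs' with _ | ⟨h, t⟩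
        · exact absurd hh (List.splitOnP_ne_nil _ _)
        · rcases t with _ | ⟨u, t'⟩
          · simp
          · rw [List.modifyHead_cons, List.modifyHead_cons]
            simp [List.dropLast_cons₂, bEvenTrail_bs_pair]
  | case3 rest hq =>
    rw [aScan, if_neg hq, if_pos rfl, bCheck_quote]
  | case4 c rest hbs hq ih =>
    rw [aScan, if_neg hbs, if_neg hq, ih, bCheck_cons_ne c rest hq hbs]

-- ===== VERDICT (by name: the statement is the Claim_ definition above) =====
theorem is_problematic_py_spec : Claim_equal_is_problematic_py := by
  intro value _
  unfold Spec_is_problematic_py is_problematic_py is_problematic_py_alt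
  split_ifs with h1 h2 h3 <;> try rfl
  · -- double-quoted branch: the two inner checks agree
    rw [PySem.List.slice_to_neg_one, aScan_eq_bCheck]
    rfl
  · exact h3.symm
  · simp only [Bool.not_eq_true] at h3
    exact h3.symm
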